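-- pv_equiv track=rewrite | github.com/PetkoAndreev/Python-Algorithms | exam-preparation/the-tyrant.py | min_sum_seq
-- ===== SOURCE A (Python) =====
-- def min_sum_seq(num_sequence):
--     size = len(num_sequence)
--     dp = [0] * size
--
--     if size < 5:
--         return min(num_sequence)
--
--     dp[0:4] = num_sequence[0:4]
--
--     for i in range(4, size):
--         dp[i] = num_sequence[i] + min(dp[i - 4: i])
--
--     return min(dp[size - 4:size])
-- ===== SOURCE B (Python) =====
-- def _madd(x, y):
--     if x is None or y is None:
--         return None
--     return x + y
--
--
-- def _mmin(x, y):
--     if x is None: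
--         return y
--     if y is None:
--         return x
--     return x if x <= y else y
--
--
-- def _dot(r, c):
--     return _mmin(_mmin(_mmin(_madd(r[0], c[0]), _madd(r[1], c[1])),
--                        _madd(r[2], c[2])), _madd(r[3], c[3]))
--
--
-- def _col(m, k):
--     return (m[0][k], m[1][k], m[2][k], m[3][k])
--
--
-- def _mat_mul(a, b):
--     return tuple(tuple(_dot(a[i], _col(b, k)) for k in range(4)) for i in range(4))
--
--
-- def _mat_apply(m, v):
--     return tuple(_dot(m[i], v) for i in range(4))
--
--
-- def _step_matrix(x):
--     return ((None, 0, None, None),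
--             (None, None, 0, None),
--             (None, None, None, 0),
--             (x, x, x, x))
--
--
-- def _prod_mats(ms):
--     if len(ms) < 2:
--         return ms[0]
--     mid = len(ms) // 2
--     return _mat_mul(_prod_mats(ms[mid:]), _prod_mats(ms[:mid]))
--
--
-- def min_sum_seq(num_sequence):
--     if len(num_sequence) < 5:
--         return min(num_sequence)
--     mats = [_step_matrix(x) for x in num_sequence[4:]]
--     m = _prod_mats(mats)
--     v = _mat_apply(m, tuple(num_sequence[0:4]))
--     return min(x for x in v if x is not None)
-- ===== Notes on version B (the rewrite author's own statement) =====
-- stated objective: alternative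
-- what changed: Replaces the left-to-right dp array (each cell = num[i] + min of the previous four cells) by a divide-and-conquer product of 4x4 (min,+) transfer matrices over the tail, applied once to the first-four-elements state vector; the combine is associative matrix composition instead of sequential table filling. Pre_ excludes only the empty list, where A raises ValueError (B raises too).
import Mathlib
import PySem

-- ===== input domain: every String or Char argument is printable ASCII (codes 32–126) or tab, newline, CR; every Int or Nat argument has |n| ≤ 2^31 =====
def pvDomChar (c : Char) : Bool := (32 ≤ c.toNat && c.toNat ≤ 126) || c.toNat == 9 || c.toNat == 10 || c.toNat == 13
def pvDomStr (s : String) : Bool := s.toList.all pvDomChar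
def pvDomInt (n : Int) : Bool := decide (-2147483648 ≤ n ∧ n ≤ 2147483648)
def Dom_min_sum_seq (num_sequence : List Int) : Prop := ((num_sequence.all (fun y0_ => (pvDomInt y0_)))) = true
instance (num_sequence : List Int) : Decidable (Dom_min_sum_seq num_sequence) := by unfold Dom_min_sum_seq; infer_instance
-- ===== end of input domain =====

-- B replaces A's left-to-right dp table by a divide-and-conquer product of 4x4 (min,+)
-- transfer matrices over the tail, applied once to the first-four-elements state vector.

-- ===== PORT A =====
-- Python min(xs) (raises on []; Pre_ excludes the empty list)
def pyMin (xs : List Int) : Int := (PySem.List.min? xs (fun x => x)).getD 0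

-- loop body: dp[i] = num_sequence[i] + min(dp[i - 4: i])
def minSumBody (num_sequence : List Int) (dp : List Int) (i : Int) : List Int :=
  PySem.List.pySetD dp i
    (PySem.List.pyGetD num_sequence i 0 +
      pyMin (PySem.List.slice dp (some (i - 4)) (some i)))

def min_sum_seq (num_sequence : List Int) : Int :=
  let size : Int := (num_sequence.length : Int)
  let dp : List Int := List.replicate num_sequence.length 0
  if size < 5 then pyMin num_sequence
  else
    let dp := PySem.List.slice num_sequence (some 0) (some 4) ++
              PySem.List.slice dp (some 4) none
    let dp := (PySem.List.pyRange 4 size 1).foldl (minSumBody num_sequence) dp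
    pyMin (PySem.List.slice dp (some (size - 4)) (some size))

-- ===== PORT B =====
-- entries of the (min,+) algebra: none plays the role of Python's None (= +infinity)
def ma (x y : Option Int) : Option Int :=
  match x, y with
  | some a, some b => some (a + b)
  | _, _ => none

def mp (x y : Option Int) : Option Int :=
  match x, y with
  | none, y => y
  | x, none => x
  | some a, some b => some (min a b)

-- vectors and matrices are tuples, as in Source B
def dotV (r c : Option Int × Option Int × Option Int × Option Int) : Option Int :=
  mp (mp (mp (ma r.1 c.1) (ma r.2.1 c.2.1)) (ma r.2.2.1 c.2.2.1)) (ma r.2.2.2 c.2.2.2)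

def col0 (m : (Option Int × Option Int × Option Int × Option Int) × (Option Int × Option Int × Option Int × Option Int) × (Option Int × Option Int × Option Int × Option Int) × (Option Int × Option Int × Option Int × Option Int)) : Option Int × Option Int × Option Int × Option Int :=
  (m.1.1, m.2.1.1, m.2.2.1.1, m.2.2.2.1)
def col1 (m : (Option Int × Option Int × Option Int × Option Int) × (Option Int × Option Int × Option Int × Option Int) × (Option Int × Option Int × Option Int × Option Int) × (Option Int × Option Int × Option Int × Option Int)) : Option Int × Option Int × Option Int × Option Int :=
  (m.1.2.1, m.2.1.2.1, m.2.2.1.2.1, m.2.2.2.2.1)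
def col2 (m : (Option Int × Option Int × Option Int × Option Int) × (Option Int × Option Int × Option Int × Option Int) × (Option Int × Option Int × Option Int × Option Int) × (Option Int × Option Int × Option Int × Option Int)) : Option Int × Option Int × Option Int × Option Int :=
  (m.1.2.2.1, m.2.1.2.2.1, m.2.2.1.2.2.1, m.2.2.2.2.2.1)
def col3 (m : (Option Int × Option Int × Option Int × Option Int) × (Option Int × Option Int × Option Int × Option Int) × (Option Int × Option Int × Option Int × Option Int) × (Option Int × Option Int × Option Int × Option Int)) : Option Int × Option Int × Option Int × Option Int :=
  (m.1.2.2.2, m.2.1.2.2.2, m.2.2.1.2.2.2, m.2.2.2.2.2.2)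

def matMul (a b : (Option Int × Option Int × Option Int × Option Int) × (Option Int × Option Int × Option Int × Option Int) × (Option Int × Option Int × Option Int × Option Int) × (Option Int × Option Int × Option Int × Option Int)) : (Option Int × Option Int × Option Int × Option Int) × (Option Int × Option Int × Option Int × Option Int) × (Option Int × Option Int × Option Int × Option Int) × (Option Int × Option Int × Option Int × Option Int) :=
  ((dotV a.1 (col0 b), dotV a.1 (col1 b), dotV a.1 (col2 b), dotV a.1 (col3 b)),
   (dotV a.2.1 (col0 b), dotV a.2.1 (col1 b), dotV a.2.1 (col2 b), dotV a.2.1 (col3 b)),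
   (dotV a.2.2.1 (col0 b), dotV a.2.2.1 (col1 b), dotV a.2.2.1 (col2 b), dotV a.2.2.1 (col3 b)),
   (dotV a.2.2.2 (col0 b), dotV a.2.2.2 (col1 b), dotV a.2.2.2 (col2 b), dotV a.2.2.2 (col3 b)))

def matApply (m : (Option Int × Option Int × Option Int × Option Int) × (Option Int × Option Int × Option Int × Option Int) × (Option Int × Option Int × Option Int × Option Int) × (Option Int × Option Int × Option Int × Option Int)) (v : Option Int × Option Int × Option Int × Option Int) : Option Int × Option Int × Option Int × Option Int :=
  (dotV m.1 v, dotV m.2.1 v, dotV m.2.2.1 v, dotV m.2.2.2 v)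

def stepMatrix (x : Int) : (Option Int × Option Int × Option Int × Option Int) × (Option Int × Option Int × Option Int × Option Int) × (Option Int × Option Int × Option Int × Option Int) × (Option Int × Option Int × Option Int × Option Int) :=
  ((none, some 0, none, none),
   (none, none, some 0, none),
   (none, none, none, some 0),
   (some x, some x, some x, some x))

-- identity matrix: headD default for the empty list, which Source B's _prod_mats is never given
def matId : (Option Int × Option Int × Option Int × Option Int) × (Option Int × Option Int × Option Int × Option Int) × (Option Int × Option Int × Option Int × Option Int) × (Option Int × Option Int × Option Int × Option Int) :=
  ((some 0, none, none, none), (none, some 0, none, none),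
   (none, none, some 0, none), (none, none, none, some 0))

def prodMats (ms : List ((Option Int × Option Int × Option Int × Option Int) × (Option Int × Option Int × Option Int × Option Int) × (Option Int × Option Int × Option Int × Option Int) × (Option Int × Option Int × Option Int × Option Int))) : (Option Int × Option Int × Option Int × Option Int) × (Option Int × Option Int × Option Int × Option Int) × (Option Int × Option Int × Option Int × Option Int) × (Option Int × Option Int × Option Int × Option Int) :=
  if ms.length < 2 then ms.headD matId
  else
    matMul (prodMats (ms.drop (ms.length / 2))) (prodMats (ms.take (ms.length / 2)))
termination_by ms.length
decreasing_by
  · simp only [List.length_drop]; omega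
  · simp only [List.length_take]; omega

-- Source B: tuple(num_sequence[0:4]) is read as the four elements; min over non-None entries
def min_sum_seq_alt (num_sequence : List Int) : Int :=
  if (num_sequence.length : Int) < 5 then pyMin num_sequence
  else
    let mats := (PySem.List.slice num_sequence (some 4) none).map stepMatrix
    let m := prodMats mats
    let v := matApply m
      (some (PySem.List.pyGetD num_sequence 0 0), some (PySem.List.pyGetD num_sequence 1 0),
       some (PySem.List.pyGetD num_sequence 2 0), some (PySem.List.pyGetD num_sequence 3 0))
    pyMin (([v.1, v.2.1, v.2.2.1, v.2.2.2]).filterMap id)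

-- ===== PRECONDITION & SPEC =====
-- Pre_ excludes only the empty list, on which A raises ValueError (min of an empty sequence).
def Pre_min_sum_seq (num_sequence : List Int) : Prop := num_sequence ≠ []
instance (num_sequence : List Int) : Decidable (Pre_min_sum_seq num_sequence) := by
  unfold Pre_min_sum_seq; infer_instance

def pvWitness_min_sum_seq : List Int := [3, -1, 4, 1, 5, -9]

def Spec_min_sum_seq (num_sequence : List Int) (out : Int) : Prop := out = min_sum_seq_alt num_sequence
instance (num_sequence : List Int) (out : Int) : Decidable (Spec_min_sum_seq num_sequence out) := by unfold Spec_min_sum_seq; infer_instance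

-- ===== CLAIM (what is proved, stated in full; the proofs are below) =====
def Claim_equal_min_sum_seq : Prop := ∀ (num_sequence : List Int), Dom_min_sum_seq num_sequence → Pre_min_sum_seq num_sequence → Spec_min_sum_seq num_sequence (min_sum_seq num_sequence)

-- ===== LEMMAS AND PROOFS =====

-- the rolling 4-window of dp values (proof-side abstraction both ports are reduced to)
def minSumStep (s : Int × Int × Int × Int) (x : Int) : Int × Int × Int × Int :=
  (s.2.1, s.2.2.1, s.2.2.2, x + min (min (min s.1 s.2.1) s.2.2.1) s.2.2.2)

def tupleSome (s : Int × Int × Int × Int) : Option Int × Option Int × Option Int × Option Int :=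
  (some s.1, some s.2.1, some s.2.2.1, some s.2.2.2)

-- the dp values A writes at positions ≥ 4, given the previous four values
def dpTail (a b c d : Int) : List Int → List Int
  | [] => []
  | x :: xs => (x + min (min (min a b) c) d) :: dpTail b c d (x + min (min (min a b) c) d) xs

theorem pyMin_four (p q r s : Int) :
    pyMin [p, q, r, s] = min (min (min p q) r) s := by
  simp [pyMin, PySem.List.min?_id_cons, List.foldl]

theorem set_append_len {L Z : List Int} (z e : Int) :
    (L ++ z :: Z).set L.length e = L ++ e :: Z := by
  induction L with
  | nil => simp
  | cons h t ih => simp [ih]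

theorem loopA (rest : List Int) :
    ∀ (Q numpre : List Int) (a b c d : Int), numpre.length = Q.length + 4 →
    (PySem.List.pyRange ((Q.length + 4 : Nat) : Int) ((Q.length + 4 + rest.length : Nat) : Int) 1).foldl
        (minSumBody (numpre ++ rest)) ((Q ++ [a, b, c, d]) ++ List.replicate rest.length 0)
      = (Q ++ [a, b, c, d]) ++ dpTail a b c d rest := by
  induction rest with
  | nil =>
    intro Q numpre a b c d _
    simp only [List.length_nil, Nat.add_zero, List.replicate_zero, List.append_nil]
    rw [PySem.List.pyRange_one_eq_nil (le_refl _)]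
    simp [dpTail]
  | cons x xs ih =>
    intro Q numpre a b c d hlen
    have hlt : ((Q.length + 4 : Nat) : Int) < ((Q.length + 4 + (x :: xs).length : Nat) : Int) := by
      exact Int.ofNat_lt.mpr (by simp)
    rw [PySem.List.pyRange_one_cons hlt]
    simp only [List.foldl_cons]
    have hbody :
        minSumBody (numpre ++ x :: xs) ((Q ++ [a, b, c, d]) ++ List.replicate (x :: xs).length 0)
          ((Q.length + 4 : Nat) : Int)
        = (Q ++ [a, b, c, d, x + min (min (min a b) c) d]) ++ List.replicate xs.length 0 := by
      unfold minSumBody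
      have hget : PySem.List.pyGetD (numpre ++ x :: xs) ((Q.length + 4 : Nat) : Int) 0 = x := by
        rw [PySem.List.pyGetD_natCast]
        rw [← hlen]
        simp [List.getD_eq_getElem?_getD]
      have hsub : ((Q.length + 4 : Nat) : Int) - 4 = ((Q.length : Nat) : Int) := by push_cast; ring
      have hslice :
          PySem.List.slice ((Q ++ [a, b, c, d]) ++ List.replicate (x :: xs).length 0)
            (some ((Q.length : Nat) : Int)) (some ((Q.length + 4 : Nat) : Int)) = [a, b, c, d] := by
        rw [PySem.List.slice_natCast]
        simp
      rw [hget, hsub, hslice, pyMin_four, PySem.List.pySetD_natCast]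
      have hQ : Q.length + 4 = (Q ++ [a, b, c, d]).length := by simp
      calc ((Q ++ [a, b, c, d]) ++ List.replicate (x :: xs).length 0).set (Q.length + 4)
              (x + min (min (min a b) c) d)
          = ((Q ++ [a, b, c, d]) ++ 0 :: List.replicate xs.length 0).set ((Q ++ [a, b, c, d]).length)
              (x + min (min (min a b) c) d) := by rw [hQ]; rfl
        _ = (Q ++ [a, b, c, d]) ++ (x + min (min (min a b) c) d) :: List.replicate xs.length 0 :=
              set_append_len 0 _
        _ = (Q ++ [a, b, c, d, x + min (min (min a b) c) d]) ++ List.replicate xs.length 0 := by simp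
    rw [hbody]
    have ih' := ih (Q ++ [a]) (numpre ++ [x]) b c d (x + min (min (min a b) c) d)
      (by simp; omega)
    rw [show ((Q.length + 4 : Nat) : Int) + 1 = (((Q ++ [a]).length + 4 : Nat) : Int) by
          simp; ring,
        show ((Q.length + 4 + (x :: xs).length : Nat) : Int)
            = (((Q ++ [a]).length + 4 + xs.length : Nat) : Int) by simp; ring,
        show numpre ++ x :: xs = (numpre ++ [x]) ++ xs by simp,
        show (Q ++ [a, b, c, d, x + min (min (min a b) c) d] : List Int)
            = (Q ++ [a]) ++ [b, c, d, x + min (min (min a b) c) d] by simp]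
    rw [ih']
    simp [dpTail]

-- the last four dp values are exactly the final rolling-window state
theorem last4 (rest : List Int) :
    ∀ (a b c d : Int),
      (a :: b :: c :: d :: dpTail a b c d rest).drop rest.length
        = [(rest.foldl minSumStep (a, b, c, d)).1,
           (rest.foldl minSumStep (a, b, c, d)).2.1,
           (rest.foldl minSumStep (a, b, c, d)).2.2.1,
           (rest.foldl minSumStep (a, b, c, d)).2.2.2] := by
  induction rest with
  | nil => intro a b c d; rfl
  | cons x xs ih =>
    intro a b c d
    have h : a :: b :: c :: d :: dpTail a b c d (x :: xs)
        = a :: (b :: c :: d :: (x + min (min (min a b) c) d) ::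
            dpTail b c d (x + min (min (min a b) c) d) xs) := by
      simp [dpTail]
    rw [h]
    simp only [List.length_cons, List.drop_succ_cons]
    rw [ih]
    rfl

-- A's port equals the rolling-window fold
theorem A_eq_roll (a b c d x : Int) (xs : List Int) :
    min_sum_seq (a :: b :: c :: d :: x :: xs)
      = (let s := (x :: xs).foldl minSumStep (a, b, c, d);
         min (min (min s.1 s.2.1) s.2.2.1) s.2.2.2) := by
  simp only [min_sum_seq]
  have hlen : (a :: b :: c :: d :: x :: xs).length = 5 + xs.length := by simp; omega
  have hnotlt : ¬ (((a :: b :: c :: d :: x :: xs).length : Nat) : Int) < 5 := by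
    rw [hlen]; push_cast; omega
  rw [if_neg hnotlt]
  have hinit1 : PySem.List.slice (a :: b :: c :: d :: x :: xs) (some 0) (some 4) = [a, b, c, d] := by
    rw [show (0 : Int) = ((0 : Nat) : Int) by norm_num,
        show (4 : Int) = ((4 : Nat) : Int) by norm_num, PySem.List.slice_natCast]
    rfl
  have hinit2 : PySem.List.slice (List.replicate (a :: b :: c :: d :: x :: xs).length (0 : Int))
      (some 4) none = List.replicate (x :: xs).length 0 := by
    rw [show (4 : Int) = ((4 : Nat) : Int) by norm_num, PySem.List.slice_from_natCast,
        hlen, List.drop_replicate,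
        show 5 + xs.length - 4 = (x :: xs).length from by simp only [List.length_cons]; omega]
  rw [hinit1, hinit2]
  have hloop := loopA (x :: xs) [] [a, b, c, d] a b c d (by simp)
  simp only [List.length_nil, List.nil_append, Nat.zero_add, List.cons_append] at hloop
  have hc4 : ((4 : Nat) : Int) = (4 : Int) := by norm_num
  have hcend : ((4 + (x :: xs).length : Nat) : Int) = (((a :: b :: c :: d :: x :: xs).length : Nat) : Int) := by
    simp; omega
  rw [hc4, hcend] at hloop
  simp only [List.cons_append, List.nil_append]
  rw [hloop]
  have hsub2 : (((a :: b :: c :: d :: x :: xs).length : Nat) : Int) - 4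
      = (((x :: xs).length : Nat) : Int) := by
    simp only [List.length_cons]; push_cast; ring
  rw [hsub2, PySem.List.slice_natCast, last4,
      show (a :: b :: c :: d :: x :: xs).length - (x :: xs).length = 4 from by simp,
      List.take_of_length_le (by simp)]
  exact pyMin_four _ _ _ _

-- (min,+) algebra facts
theorem mp_assoc (x y z : Option Int) : mp (mp x y) z = mp x (mp y z) := by
  cases x <;> cases y <;> cases z <;> simp [mp, min_assoc]

theorem mp_comm (x y : Option Int) : mp x y = mp y x := by
  cases x <;> cases y <;> simp [mp, min_comm]

theorem mp_left_comm (x y z : Option Int) : mp x (mp y z) = mp y (mp x z) := by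
  rw [← mp_assoc, mp_comm x y, mp_assoc]

theorem ma_assoc (x y z : Option Int) : ma (ma x y) z = ma x (ma y z) := by
  cases x <;> cases y <;> cases z <;> simp [ma, add_assoc]

theorem ma_mp_left (x y z : Option Int) : ma x (mp y z) = mp (ma x y) (ma x z) := by
  cases x <;> cases y <;> cases z <;> simp [ma, mp]

theorem ma_mp_right (x y z : Option Int) : ma (mp x y) z = mp (ma x z) (ma y z) := by
  cases x <;> cases y <;> cases z <;> simp [ma, mp]

-- one row of the action law: composing transfer matrices commutes with applying them
theorem dot_row (r : Option Int × Option Int × Option Int × Option Int)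
    (B : (Option Int × Option Int × Option Int × Option Int) × (Option Int × Option Int × Option Int × Option Int) × (Option Int × Option Int × Option Int × Option Int) × (Option Int × Option Int × Option Int × Option Int))
    (v : Option Int × Option Int × Option Int × Option Int) :
    dotV (dotV r (col0 B), dotV r (col1 B), dotV r (col2 B), dotV r (col3 B)) v
      = dotV r (matApply B v) := by
  obtain ⟨r0, r1, r2, r3⟩ := r
  obtain ⟨⟨b00, b01, b02, b03⟩, ⟨b10, b11, b12, b13⟩, ⟨b20, b21, b22, b23⟩, ⟨b30, b31, b32, b33⟩⟩ := B
  obtain ⟨v0, v1, v2, v3⟩ := v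
  simp only [dotV, col0, col1, col2, col3, matApply, ma_mp_right, ma_mp_left, ma_assoc]
  simp only [mp_assoc]
  simp [mp_left_comm]

theorem matMul_apply (A B : (Option Int × Option Int × Option Int × Option Int) × (Option Int × Option Int × Option Int × Option Int) × (Option Int × Option Int × Option Int × Option Int) × (Option Int × Option Int × Option Int × Option Int))
    (v : Option Int × Option Int × Option Int × Option Int) :
    matApply (matMul A B) v = matApply A (matApply B v) := by
  obtain ⟨a0, a1, a2, a3⟩ := A
  simp only [matMul, matApply]
  rw [dot_row, dot_row, dot_row, dot_row]
  rfl

-- the divide-and-conquer product acts like folding the factors one by one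
theorem prod_apply (ms : List ((Option Int × Option Int × Option Int × Option Int) × (Option Int × Option Int × Option Int × Option Int) × (Option Int × Option Int × Option Int × Option Int) × (Option Int × Option Int × Option Int × Option Int))) :
    ms ≠ [] →
    ∀ v, matApply (prodMats ms) v = ms.foldl (fun w m => matApply m w) v := by
  induction ms using prodMats.induct with
  | case1 ms hsmall =>
    intro hne v
    rw [prodMats, if_pos hsmall]
    match ms, hne with
    | [m], _ => rfl
    | m1 :: m2 :: t, _ => simp at hsmall
  | case2 ms hsmall ihdrop ihtake =>
    intro hne v
    have hlen2 : 2 ≤ ms.length := Nat.not_lt.mp hsmall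
    rw [prodMats, if_neg hsmall]
    rw [matMul_apply]
    have hdne : ms.drop (ms.length / 2) ≠ [] := by
      intro h
      have h2 := congrArg List.length h
      simp only [List.length_drop, List.length_nil] at h2
      omega
    have htne : ms.take (ms.length / 2) ≠ [] := by
      intro h
      have h2 := congrArg List.length h
      simp only [List.length_take, List.length_nil] at h2
      omega
    rw [ihtake htne, ihdrop hdne, ← List.foldl_append, List.take_append_drop]

-- one transfer matrix performs one rolling-window step
theorem step_apply (x : Int) (s : Int × Int × Int × Int) :
    matApply (stepMatrix x) (tupleSome s) = tupleSome (minSumStep s x) := by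
  obtain ⟨a, b, c, d⟩ := s
  simp only [matApply, stepMatrix, tupleSome, minSumStep, dotV, ma, mp, zero_add]
  have h4 : min (min (min (x + a) (x + b)) (x + c)) (x + d)
      = x + min (min (min a b) c) d := by omega
  rw [h4]

theorem fold_tuple (xs : List Int) : ∀ s : Int × Int × Int × Int,
    xs.foldl (fun w x => matApply (stepMatrix x) w) (tupleSome s)
      = tupleSome (xs.foldl minSumStep s) := by
  induction xs with
  | nil => intro s; rfl
  | cons x t ih => intro s; simp only [List.foldl_cons, step_apply]; exact ih _

-- B's port equals the rolling-window fold
theorem B_eq_roll (a b c d x : Int) (xs : List Int) :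
    min_sum_seq_alt (a :: b :: c :: d :: x :: xs)
      = (let s := (x :: xs).foldl minSumStep (a, b, c, d);
         min (min (min s.1 s.2.1) s.2.2.1) s.2.2.2) := by
  simp only [min_sum_seq_alt]
  have hlen : (a :: b :: c :: d :: x :: xs).length = 5 + xs.length := by simp; omega
  have hnotlt : ¬ (((a :: b :: c :: d :: x :: xs).length : Nat) : Int) < 5 := by
    rw [hlen]; push_cast; omega
  rw [if_neg hnotlt]
  have hga : PySem.List.pyGetD (a :: b :: c :: d :: x :: xs) 0 0 = a := by
    rw [show (0 : Int) = ((0 : Nat) : Int) by norm_num, PySem.List.pyGetD_natCast]; rfl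
  have hgb : PySem.List.pyGetD (a :: b :: c :: d :: x :: xs) 1 0 = b := by
    rw [show (1 : Int) = ((1 : Nat) : Int) by norm_num, PySem.List.pyGetD_natCast]; rfl
  have hgc : PySem.List.pyGetD (a :: b :: c :: d :: x :: xs) 2 0 = c := by
    rw [show (2 : Int) = ((2 : Nat) : Int) by norm_num, PySem.List.pyGetD_natCast]; rfl
  have hgd : PySem.List.pyGetD (a :: b :: c :: d :: x :: xs) 3 0 = d := by
    rw [show (3 : Int) = ((3 : Nat) : Int) by norm_num, PySem.List.pyGetD_natCast]; rfl
  have htail : PySem.List.slice (a :: b :: c :: d :: x :: xs) (some 4) none = x :: xs := by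
    rw [show (4 : Int) = ((4 : Nat) : Int) by norm_num, PySem.List.slice_from_natCast]; rfl
  rw [hga, hgb, hgc, hgd, htail]
  have hprod := prod_apply ((x :: xs).map stepMatrix) (by simp) (tupleSome (a, b, c, d))
  rw [List.foldl_map] at hprod
  rw [show ((some a, some b, some c, some d) : Option Int × Option Int × Option Int × Option Int)
        = tupleSome (a, b, c, d) from rfl, hprod, fold_tuple]
  rw [show (((x :: xs).foldl minSumStep (a, b, c, d)) : Int × Int × Int × Int)
        = ((x :: xs).foldl minSumStep (a, b, c, d)) from rfl]
  simp only [tupleSome, List.filterMap_cons, List.filterMap_nil, id]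
  exact pyMin_four _ _ _ _

-- ===== VERDICT (by name: the statement is the Claim_ definition above) =====
theorem min_sum_seq_spec : Claim_equal_min_sum_seq := by
  intro num _dom _pre
  unfold Spec_min_sum_seq
  match num with
  | [] => exact absurd rfl _pre
  | [a] => rfl
  | [a, b] => rfl
  | [a, b, c] => rfl
  | [a, b, c, d] => rfl
  | a :: b :: c :: d :: x :: xs => rw [A_eq_roll, B_eq_roll]
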